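-- pv_equiv track=rewrite | github.com/Evgene-Kopylov/manga-tracker | fastapi/routers/page_functions.py | remove_index_number
-- ===== SOURCE A (Python) =====
-- def remove_index_number(s):
--     """уберает цифры в начале строки"""
--     res = ''
--     for char in s:
--         if res and char.isdigit():
--             res += char
--         if not char.isdigit():
--             res += char
--     return res
-- ===== SOURCE B (Python) =====
-- def remove_index_number(s):
--     """уберает цифры в начале строки"""
--     i = 0
--     while i < len(s) and s[i].isdigit():
--         i += 1
--     return s[i:]
-- ===== Notes on version B (the rewrite author's own statement) =====
-- stated objective: faster
-- what changed: Instead of scanning every character and appending to an accumulator string (with an emptiness test per character), B finds the boundary index of the leading digit run and returns one slice of the rest.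
import Mathlib
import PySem

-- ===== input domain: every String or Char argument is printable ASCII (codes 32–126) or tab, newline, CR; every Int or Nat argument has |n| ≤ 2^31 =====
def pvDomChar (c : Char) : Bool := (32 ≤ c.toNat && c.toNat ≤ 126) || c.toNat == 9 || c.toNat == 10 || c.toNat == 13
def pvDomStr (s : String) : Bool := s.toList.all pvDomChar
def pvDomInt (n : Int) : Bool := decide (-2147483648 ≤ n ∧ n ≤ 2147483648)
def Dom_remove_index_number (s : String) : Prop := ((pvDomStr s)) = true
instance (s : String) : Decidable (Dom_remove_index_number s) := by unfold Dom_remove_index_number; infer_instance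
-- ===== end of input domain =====

-- B replaces A's per-character accumulation (with an emptiness test each step) by
-- finding the end of the leading digit run and returning one slice of the rest.

-- ===== PORT A =====
-- one step of A's loop body: the two successive `if` statements on `res`
def pvStepA (res : List Char) (c : Char) : List Char :=
  let res1 := if res ≠ [] ∧ PySem.Chars.isdigit c then res ++ [c] else res
  if ¬ PySem.Chars.isdigit c then res1 ++ [c] else res1

def remove_index_number (s : String) : String :=
  String.mk (s.toList.foldl pvStepA [])

-- ===== PORT B =====
-- B's while loop: advance past the leading digits, then return the tail (s[i:])
def pvTailB : List Char → List Char
  | [] => []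
  | c :: t => if PySem.Chars.isdigit c then pvTailB t else c :: t

def remove_index_number_alt (s : String) : String :=
  String.mk (pvTailB s.toList)

-- ===== PRECONDITION & SPEC =====
def Spec_remove_index_number (s : String) (out : String) : Prop := out = remove_index_number_alt s
instance (s : String) (out : String) : Decidable (Spec_remove_index_number s out) := by unfold Spec_remove_index_number; infer_instance

-- ===== CLAIM (what is proved, stated in full; the proofs are below) =====
def Claim_equal_remove_index_number : Prop := ∀ (s : String), Dom_remove_index_number s → Spec_remove_index_number s (remove_index_number s)

-- ===== LEMMAS AND PROOFS =====
-- once res is nonempty, A's loop appends every remaining character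
lemma foldl_stepA_nonempty (l : List Char) : ∀ (acc : List Char), acc ≠ [] →
    l.foldl pvStepA acc = acc ++ l := by
  induction l with
  | nil => intro acc _; simp
  | cons c t ih =>
    intro acc hacc
    by_cases hd : PySem.Chars.isdigit c
    · have : pvStepA acc c = acc ++ [c] := by simp [pvStepA, hacc, hd]
      simp only [List.foldl_cons, this]
      rw [ih (acc ++ [c]) (by simp)]; simp
    · have : pvStepA acc c = acc ++ [c] := by simp [pvStepA, hacc, hd]
      simp only [List.foldl_cons, this]
      rw [ih (acc ++ [c]) (by simp)]; simp

lemma foldl_stepA_nil (l : List Char) : l.foldl pvStepA [] = pvTailB l := by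
  induction l with
  | nil => simp [pvTailB]
  | cons c t ih =>
    by_cases hd : PySem.Chars.isdigit c
    · have : pvStepA [] c = [] := by simp [pvStepA, hd]
      simp [pvTailB, hd, this, ih]
    · have : pvStepA [] c = [c] := by simp [pvStepA, hd]
      simp only [List.foldl_cons, this, pvTailB, hd]
      exact foldl_stepA_nonempty t [c] (by simp)

-- ===== VERDICT (by name: the statement is the Claim_ definition above) =====
theorem remove_index_number_spec : Claim_equal_remove_index_number := by
  intro s _
  unfold Spec_remove_index_number remove_index_number remove_index_number_alt
  rw [foldl_stepA_nil]
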